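-- pv_equiv track=rewrite | github.com/hello-roderickwang/Playground | InterviewProblems/IBM_OA.py | partitioningArray
-- ===== SOURCE A (Python) =====
-- import collections
--
-- def partitioningArray(array, k):
--     counter = collections.Counter(array)
--     if len(array) % k != 0:
--         return 'NO'
--     L = len(array) // k
--     for key in counter.keys():
--         if counter[key] > L:
--             return 'NO'
--     return 'YES'
-- ===== SOURCE B (Python) =====
-- def partitioningArray(array, k):
--     if len(array) % k != 0:
--         return 'NO'
--     L = len(array) // k
--     run = 0
--     prev = None
--     for x in sorted(array):
--         if prev is not None and x == prev:
--             run += 1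
--         else:
--             prev = x
--             run = 1
--         if run > L:
--             return 'NO'
--     return 'YES'
-- ===== Notes on version B (the rewrite author's own statement) =====
-- stated objective: alternative
-- what changed: Replaces the Counter frequency table and key scan by sorting the array and checking in one pass that no run of consecutive equal elements exceeds len(array)//k.
import Mathlib
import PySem

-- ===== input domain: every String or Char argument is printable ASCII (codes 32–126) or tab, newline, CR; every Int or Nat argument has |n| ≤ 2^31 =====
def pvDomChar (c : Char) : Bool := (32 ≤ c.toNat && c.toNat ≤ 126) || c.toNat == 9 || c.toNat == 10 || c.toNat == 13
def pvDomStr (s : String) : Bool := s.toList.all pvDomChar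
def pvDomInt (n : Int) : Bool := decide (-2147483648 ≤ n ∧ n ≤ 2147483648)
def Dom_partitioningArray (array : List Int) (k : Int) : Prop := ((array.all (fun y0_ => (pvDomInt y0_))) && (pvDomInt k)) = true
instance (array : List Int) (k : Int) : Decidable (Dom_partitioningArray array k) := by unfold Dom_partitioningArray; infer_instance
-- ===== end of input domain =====

-- B replaces A's Counter frequency table by sort-then-count-runs: an alternative algorithm of similar cost.


-- ===== PORT A =====
-- the 'for key in counter.keys(): if counter[key] > L: return NO' loop
def pArrLoop (L : Int) (d : PySem.Dict Int Int) : List Int → String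
  | [] => "YES"
  | key :: rest => if d.getD key 0 > L then "NO" else pArrLoop L d rest

def partitioningArray (array : List Int) (k : Int) : String :=
  let counter := PySem.Dict.counter array
  if PySem.Int.mod (array.length : Int) k ≠ 0 then "NO"
  else
    let L := PySem.Int.floordiv (array.length : Int) k
    pArrLoop L counter counter.keys

-- ===== PORT B =====
-- the run-length scan over the sorted list: state (prev, run)
def pArrScan (L : Int) : List Int → Option Int → Int → String
  | [], _, _ => "YES"
  | x :: xs, prev, run =>
      let run' := if prev = some x then run + 1 else 1
      if run' > L then "NO" else pArrScan L xs (some x) run'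

def partitioningArray_alt (array : List Int) (k : Int) : String :=
  if PySem.Int.mod (array.length : Int) k ≠ 0 then "NO"
  else
    let L := PySem.Int.floordiv (array.length : Int) k
    pArrScan L (PySem.List.sorted array (fun x => x) false) none 0

-- ===== PRECONDITION & SPEC =====
-- Pre_ excludes exactly k = 0, where both Pythons raise ZeroDivisionError on 'len(array) % k'.
def Pre_partitioningArray (array : List Int) (k : Int) : Prop := k ≠ 0
instance (array : List Int) (k : Int) : Decidable (Pre_partitioningArray array k) := by unfold Pre_partitioningArray; infer_instance
def pvWitness_partitioningArray : List Int × Int := ([1, 2], 2)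

def Spec_partitioningArray (array : List Int) (k : Int) (out : String) : Prop := out = partitioningArray_alt array k
instance (array : List Int) (k : Int) (out : String) : Decidable (Spec_partitioningArray array k out) := by unfold Spec_partitioningArray; infer_instance

-- ===== CLAIM (what is proved, stated in full; the proofs are below) =====
def Claim_equal_partitioningArray : Prop := ∀ (array : List Int) (k : Int), Dom_partitioningArray array k → Pre_partitioningArray array k → Spec_partitioningArray array k (partitioningArray array k)

-- ===== LEMMAS AND PROOFS =====

-- step lemmas for B's scan
theorem pArrScan_step_eq (L : Int) (xs : List Int) (p run : Int) :
    pArrScan L (p :: xs) (some p) run =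
      if run + 1 > L then "NO" else pArrScan L xs (some p) (run + 1) := by
  simp [pArrScan]

theorem pArrScan_step_ne (L : Int) (xs : List Int) (x : Int) (prev : Option Int) (run : Int)
    (h : prev ≠ some x) :
    pArrScan L (x :: xs) prev run =
      if 1 > L then "NO" else pArrScan L xs (some x) 1 := by
  simp [pArrScan, h]

-- A's key loop returns YES iff every stored count is ≤ L.
theorem pArrLoop_eq (L : Int) (d : PySem.Dict Int Int) (ks : List Int) :
    pArrLoop L d ks = if ∀ key ∈ ks, d.getD key 0 ≤ L then "YES" else "NO" := by
  induction ks with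
  | nil => simp [pArrLoop]
  | cons key rest ih =>
      by_cases h : d.getD key 0 > L
      · rw [pArrLoop, if_pos h, if_neg]
        intro hall; exact absurd (hall key (by simp)) (by omega)
      · rw [pArrLoop, if_neg h, ih]
        by_cases hall : ∀ x ∈ rest, d.getD x 0 ≤ L
        · rw [if_pos hall, if_pos]; intro x hx
          rcases List.mem_cons.1 hx with rfl | hx
          · omega
          · exact hall x hx
        · rw [if_neg hall, if_neg]
          intro hc; exact hall fun x hx => hc x (List.mem_cons_of_mem _ hx)

-- B's scan, in the middle of a run of p's (r of them already consumed, r ≤ L),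
-- on a sorted tail all of whose elements are ≥ p.
theorem pArrScan_sorted (L : Int) : ∀ (xs : List Int) (p r : Int),
    xs.Pairwise (· ≤ ·) → (∀ y ∈ xs, p ≤ y) → r ≤ L →
    pArrScan L xs (some p) r =
      if r + (xs.count p : Int) ≤ L ∧ ∀ x ∈ xs, x ≠ p → (xs.count x : Int) ≤ L
      then "YES" else "NO" := by
  intro xs
  induction xs with
  | nil => intro p r _ _ hr; simp [pArrScan]; omega
  | cons x t ih =>
      intro p r hpw hall hr
      have hxt : ∀ y ∈ t, x ≤ y := (List.pairwise_cons.1 hpw).1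
      have hpw' : t.Pairwise (· ≤ ·) := (List.pairwise_cons.1 hpw).2
      by_cases hpx : p = x
      · subst hpx
        have hcnt : ((p :: t).count p : Int) = (t.count p : Int) + 1 := by
          rw [List.count_cons_self]; push_cast; ring
        rw [pArrScan_step_eq]
        by_cases hL : r + 1 > L
        · rw [if_pos hL, if_neg]; rintro ⟨h1, -⟩; rw [hcnt] at h1; omega
        · rw [if_neg hL, ih p (r + 1) hpw' hxt (by omega)]
          have hiff : (r + 1 + (t.count p : Int) ≤ L ∧ ∀ x ∈ t, x ≠ p → (t.count x : Int) ≤ L)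
              ↔ (r + ((p :: t).count p : Int) ≤ L ∧ ∀ x ∈ p :: t, x ≠ p → ((p :: t).count x : Int) ≤ L) := by
            constructor
            · rintro ⟨h1, h2⟩
              refine ⟨by rw [hcnt]; omega, ?_⟩
              intro y hy hyp
              have hyt : y ∈ t := by
                rcases List.mem_cons.1 hy with rfl | h'
                · exact absurd rfl hyp
                · exact h'
              rw [List.count_cons_of_ne (Ne.symm hyp)]; exact h2 y hyt hyp
            · rintro ⟨h1, h2⟩
              refine ⟨by rw [hcnt] at h1; omega, ?_⟩
              intro y hy hyp
              have := h2 y (List.mem_cons_of_mem _ hy) hyp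
              rwa [List.count_cons_of_ne (Ne.symm hyp)] at this
          rw [if_congr hiff rfl rfl]
      · have hplt : p < x := lt_of_le_of_ne (hall x (by simp)) hpx
        have hpt : ∀ y ∈ x :: t, p < y := by
          intro y hy; rcases List.mem_cons.1 hy with rfl | hy
          · exact hplt
          · exact lt_of_lt_of_le hplt (hxt y hy)
        have hcp : ((x :: t).count p : Int) = 0 := by
          have : p ∉ x :: t := fun hmem => absurd rfl (ne_of_gt (hpt p hmem))
          rw [List.count_eq_zero.2 this]; rfl
        have hsome : (some p : Option Int) ≠ some x := by simpa using hpx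
        rw [pArrScan_step_ne L t x (some p) r hsome]
        by_cases hL : (1 : Int) > L
        · rw [if_pos hL, if_neg]; rintro ⟨-, h2⟩
          have hx1 := h2 x (by simp) (Ne.symm hpx)
          rw [List.count_cons_self] at hx1; push_cast at hx1; omega
        · rw [if_neg hL, ih x 1 hpw' hxt (by omega)]
          have hiff : ((1 : Int) + (t.count x : Int) ≤ L ∧ ∀ y ∈ t, y ≠ x → (t.count y : Int) ≤ L)
              ↔ (r + ((x :: t).count p : Int) ≤ L ∧ ∀ y ∈ x :: t, y ≠ p → ((x :: t).count y : Int) ≤ L) := by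
            constructor
            · rintro ⟨h1, h2⟩
              refine ⟨by rw [hcp]; omega, ?_⟩
              intro y hy _
              rcases List.mem_cons.1 hy with rfl | hyt
              · rw [List.count_cons_self]; push_cast; omega
              · by_cases hyx : y = x
                · subst hyx; rw [List.count_cons_self]; push_cast; omega
                · rw [List.count_cons_of_ne (fun h => hyx h.symm)]; exact h2 y hyt hyx
            · rintro ⟨-, h2⟩
              constructor
              · have hx1 := h2 x (by simp) (Ne.symm hpx)
                rw [List.count_cons_self] at hx1; push_cast at hx1 ⊢; omega
              · intro y hyt hyx
                have := h2 y (List.mem_cons_of_mem _ hyt) (ne_of_gt (hpt y (List.mem_cons_of_mem _ hyt)))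
                rwa [List.count_cons_of_ne (fun h => hyx h.symm)] at this
          rw [if_congr hiff rfl rfl]

-- B's scan started fresh on a sorted list.
theorem pArrScan_top (L : Int) (xs : List Int) (hpw : xs.Pairwise (· ≤ ·)) :
    pArrScan L xs none 0 = if ∀ x ∈ xs, (xs.count x : Int) ≤ L then "YES" else "NO" := by
  cases xs with
  | nil => simp [pArrScan]
  | cons x t =>
      have hxt : ∀ y ∈ t, x ≤ y := (List.pairwise_cons.1 hpw).1
      have hpw' : t.Pairwise (· ≤ ·) := (List.pairwise_cons.1 hpw).2
      rw [pArrScan_step_ne L t x none 0 (by simp)]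
      by_cases hL : (1 : Int) > L
      · rw [if_pos hL, if_neg]; intro hc
        have hx1 := hc x (by simp)
        rw [List.count_cons_self] at hx1; push_cast at hx1; omega
      · rw [if_neg hL, pArrScan_sorted L t x 1 hpw' hxt (by omega)]
        have hiff : ((1 : Int) + (t.count x : Int) ≤ L ∧ ∀ y ∈ t, y ≠ x → (t.count y : Int) ≤ L)
            ↔ ∀ y ∈ x :: t, ((x :: t).count y : Int) ≤ L := by
          constructor
          · rintro ⟨h1, h2⟩ y hy
            rcases List.mem_cons.1 hy with rfl | hyt
            · rw [List.count_cons_self]; push_cast; omega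
            · by_cases hyx : y = x
              · subst hyx; rw [List.count_cons_self]; push_cast; omega
              · rw [List.count_cons_of_ne (fun h => hyx h.symm)]; exact h2 y hyt hyx
          · intro h
            constructor
            · have hx1 := h x (by simp)
              rw [List.count_cons_self] at hx1; push_cast at hx1 ⊢; omega
            · intro y hyt hyx
              have := h y (List.mem_cons_of_mem _ hyt)
              rwa [List.count_cons_of_ne (fun h => hyx h.symm)] at this
        rw [if_congr hiff rfl rfl]

-- ===== VERDICT (by name: the statement is the Claim_ definition above) =====
theorem partitioningArray_spec : Claim_equal_partitioningArray := by
  intro array k _hdom _hk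
  unfold Spec_partitioningArray partitioningArray partitioningArray_alt
  by_cases hmod : PySem.Int.mod (array.length : Int) k ≠ 0
  · simp only [if_pos hmod]
  · simp only [if_neg hmod]
    set L := PySem.Int.floordiv (array.length : Int) k with hLdef
    set s := PySem.List.sorted array (fun x => x) false with hs
    have hperm : s.Perm array := PySem.List.sorted_perm array (fun x => x) false
    have hpw : s.Pairwise (· ≤ ·) := PySem.List.sorted_pairwise array (fun x => x)
    rw [pArrLoop_eq, pArrScan_top L s hpw]
    have hiff : (∀ key ∈ (PySem.Dict.counter array).keys, (PySem.Dict.counter array).getD key 0 ≤ L)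
        ↔ ∀ x ∈ s, (s.count x : Int) ≤ L := by
      simp only [PySem.Dict.keys_counter, PySem.Dict.getD_counter]
      constructor
      · intro h x hx
        rw [hperm.count_eq]
        exact h x ((PySem.Set.mem_ofList _ _).2 (hperm.mem_iff.1 hx))
      · intro h x hx
        have hxa : x ∈ array := (PySem.Set.mem_ofList _ _).1 hx
        have := h x (hperm.mem_iff.2 hxa)
        rwa [hperm.count_eq] at this
    rw [if_congr hiff rfl rfl]
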